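-- pv_equiv track=rewrite | github.com/techleadevelopers/force-military-scan-offensive | scanner/sniper_scan.py | _detect_waf
-- ===== SOURCE A (Python) =====
-- from typing import List, Dict, Any
--
-- WAF_SIGNATURES = {
--     "Cloudflare": ["cf-ray", "__cfduid", "cloudflare", "cf-cache-status"],
--     "AWS WAF": ["x-amz-cf-id", "x-amzn-requestid", "awselb"],
--     "Sucuri": ["sucuri", "sucuri/cloudproxy", "x-sucuri-id"],
--     "ModSecurity": ["modsecurity", "_mod_security"],
--     "F5 BIG-IP": ["big-ip", "f5", "bigipserver"],
--     "Akamai": ["akamai", "akamaighost", "x-akamai"],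
--     "Wordfence": ["wordfence"],
--     "Imperva": ["incapsula", "imperva", "x-iinfo"],
--     "Fortinet": ["fortigate", "fortiweb"],
-- }
--
-- def _detect_waf(headers: dict, html: str) -> List[str]:
--     detected = []
--     html_lower = html.lower()[:5000]
--     for waf_name, signatures in WAF_SIGNATURES.items():
--         for sig in signatures:
--             sig_lower = sig.lower()
--             for h_key, h_val in headers.items():
--                 if sig_lower in h_key or sig_lower in h_val.lower():
--                     detected.append(waf_name)
--                     break
--             else:
--                 if sig_lower in html_lower:
--                     detected.append(waf_name)
--             if waf_name in detected:
--                 break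
--     return list(set(detected)) if detected else ["None"]
-- ===== SOURCE B (Python) =====
-- from typing import List
--
-- WAF_SIGNATURES = {
--     "Cloudflare": ["cf-ray", "__cfduid", "cloudflare", "cf-cache-status"],
--     "AWS WAF": ["x-amz-cf-id", "x-amzn-requestid", "awselb"],
--     "Sucuri": ["sucuri", "sucuri/cloudproxy", "x-sucuri-id"],
--     "ModSecurity": ["modsecurity", "_mod_security"],
--     "F5 BIG-IP": ["big-ip", "f5", "bigipserver"],
--     "Akamai": ["akamai", "akamaighost", "x-akamai"],
--     "Wordfence": ["wordfence"],
--     "Imperva": ["incapsula", "imperva", "x-iinfo"],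
--     "Fortinet": ["fortigate", "fortiweb"],
-- }
--
-- def _detect_waf(headers: dict, html: str) -> List[str]:
--     # Stage 1: gather the search targets once: lowered/truncated html, header keys as-is, lowered values.
--     pieces = [html.lower()[:5000]]
--     for k, v in headers.items():
--         pieces.append(k)
--         pieces.append(v.lower())
--     # Stage 2: piece-major scan — for each target mark every WAF one of whose signatures it contains.
--     found = set()
--     for piece in pieces:
--         for waf, sigs in WAF_SIGNATURES.items():
--             if any(sig.lower() in piece for sig in sigs):
--                 found.add(waf)
--     # Stage 3: emit the matched WAFs in table order (a set result, so the scan order above is irrelevant).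
--     detected = [waf for waf in WAF_SIGNATURES if waf in found]
--     return list(set(detected)) if detected else ["None"]
-- ===== Notes on version B (the rewrite author's own statement) =====
-- stated objective: alternative
-- what changed: B inverts the traversal: it gathers all search targets (truncated lowered html, header keys, lowered values) once, then scans piece-major, accumulating a set of matched WAF names, and finally emits them in table order — replacing A's WAF-major nested rescan of the headers with break/else control flow; a separate proof shows the traversal order does not matter.
import Mathlib
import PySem

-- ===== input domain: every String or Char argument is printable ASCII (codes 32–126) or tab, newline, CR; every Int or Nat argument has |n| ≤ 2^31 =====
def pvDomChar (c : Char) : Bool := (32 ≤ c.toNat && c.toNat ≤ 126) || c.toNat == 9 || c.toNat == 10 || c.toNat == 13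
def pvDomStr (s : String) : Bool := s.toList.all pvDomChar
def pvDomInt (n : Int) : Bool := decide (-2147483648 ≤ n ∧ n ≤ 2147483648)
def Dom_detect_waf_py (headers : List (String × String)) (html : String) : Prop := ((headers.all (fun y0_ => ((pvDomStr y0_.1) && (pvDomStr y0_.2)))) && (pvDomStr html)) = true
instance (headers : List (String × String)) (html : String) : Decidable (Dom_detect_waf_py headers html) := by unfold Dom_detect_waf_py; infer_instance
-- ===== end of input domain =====

-- B inverts the traversal: a piece-major scan accumulating a set of matched WAF names, then emission in table order; same result, order-independence proved.

def wafSignatures : List (String × List String) :=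
  [("Cloudflare", ["cf-ray", "__cfduid", "cloudflare", "cf-cache-status"]),
   ("AWS WAF", ["x-amz-cf-id", "x-amzn-requestid", "awselb"]),
   ("Sucuri", ["sucuri", "sucuri/cloudproxy", "x-sucuri-id"]),
   ("ModSecurity", ["modsecurity", "_mod_security"]),
   ("F5 BIG-IP", ["big-ip", "f5", "bigipserver"]),
   ("Akamai", ["akamai", "akamaighost", "x-akamai"]),
   ("Wordfence", ["wordfence"]),
   ("Imperva", ["incapsula", "imperva", "x-iinfo"]),
   ("Fortinet", ["fortigate", "fortiweb"])]

-- ===== PORT A =====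
-- inner 'for h_key, h_val in headers.items(): … break / else: html check' (appends waf_name at most once)
def aHeaderLoop (sigLower waf : String) (hs : List (String × String)) (htmlLower : String)
    (detected : List String) : List String :=
  match hs with
  | [] => if PySem.Str.isIn sigLower htmlLower then detected ++ [waf] else detected
  | (k, v) :: rest =>
      if PySem.Str.isIn sigLower k || PySem.Str.isIn sigLower (PySem.Str.lower v) then
        detected ++ [waf]
      else aHeaderLoop sigLower waf rest htmlLower detected

-- 'for sig in signatures: … ; if waf_name in detected: break'
def aSigLoop (waf : String) (sigs : List String) (headers : List (String × String))
    (htmlLower : String) (detected : List String) : List String :=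
  match sigs with
  | [] => detected
  | sig :: rest =>
      let detected' := aHeaderLoop (PySem.Str.lower sig) waf headers htmlLower detected
      if detected'.contains waf then detected'
      else aSigLoop waf rest headers htmlLower detected'

def detect_waf_py (headers : List (String × String)) (html : String) : List String :=
  let htmlLower := PySem.Str.slice (PySem.Str.lower html) none (some 5000)
  let detected := wafSignatures.foldl
    (fun detected ws => aSigLoop ws.1 ws.2 headers htmlLower detected) []
  if detected ≠ [] then PySem.Set.ofList detected else ["None"]

-- ===== PORT B =====
def detect_waf_py_alt (headers : List (String × String)) (html : String) : List String :=
  let pieces := PySem.Str.slice (PySem.Str.lower html) none (some 5000) ::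
    headers.flatMap (fun kv => [kv.1, PySem.Str.lower kv.2])
  let found := pieces.foldl (fun fd piece =>
    wafSignatures.foldl (fun fd ws =>
      if ws.2.any (fun sig => PySem.Str.isIn (PySem.Str.lower sig) piece)
      then PySem.Set.add fd ws.1 else fd) fd) PySem.Set.empty
  let detected := (wafSignatures.map Prod.fst).filter (fun w => PySem.Set.contains found w)
  if detected ≠ [] then PySem.Set.ofList detected else ["None"]

-- ===== PRECONDITION & SPEC =====
def Spec_detect_waf_py (headers : List (String × String)) (html : String) (out : List String) : Prop := out = detect_waf_py_alt headers html
instance (headers : List (String × String)) (html : String) (out : List String) : Decidable (Spec_detect_waf_py headers html out) := by unfold Spec_detect_waf_py; infer_instance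

-- ===== CLAIM (what is proved, stated in full; the proofs are below) =====
def Claim_equal_detect_waf_py : Prop := ∀ (headers : List (String × String)) (html : String), Dom_detect_waf_py headers html → Spec_detect_waf_py headers html (detect_waf_py headers html)

-- ===== LEMMAS AND PROOFS =====

-- A's per-signature condition: some header key/lowered value contains the signature, or the html does.
def aCond (sigLower : String) (headers : List (String × String)) (htmlLower : String) : Bool :=
  headers.any (fun kv => PySem.Str.isIn sigLower kv.1 || PySem.Str.isIn sigLower (PySem.Str.lower kv.2))
    || PySem.Str.isIn sigLower htmlLower

-- B's pieces, as a function.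
def bPieces (headers : List (String × String)) (htmlLower : String) : List String :=
  htmlLower :: headers.flatMap (fun kv => [kv.1, PySem.Str.lower kv.2])

-- per-WAF condition (signature-major)
def sCond (sigs : List String) (headers : List (String × String)) (htmlLower : String) : Bool :=
  sigs.any (fun sig => (bPieces headers htmlLower).any (fun p => PySem.Str.isIn (PySem.Str.lower sig) p))

-- per-(piece, WAF) hit used by B's inner loop
def pHit (piece : String) (sigs : List String) : Bool :=
  sigs.any (fun sig => PySem.Str.isIn (PySem.Str.lower sig) piece)

theorem aHeaderLoop_eq (sigLower waf : String) (hs : List (String × String)) (htmlLower : String)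
    (detected : List String) :
    aHeaderLoop sigLower waf hs htmlLower detected =
      if aCond sigLower hs htmlLower then detected ++ [waf] else detected := by
  induction hs with
  | nil => simp only [aHeaderLoop, aCond, List.any_nil, Bool.false_or]
  | cons kv rest ih =>
      obtain ⟨k, v⟩ := kv
      simp only [aHeaderLoop, aCond, List.any_cons] at ih ⊢
      by_cases h : (PySem.Str.isIn sigLower k || PySem.Str.isIn sigLower (PySem.Str.lower v)) = true
      · rw [if_pos h]
        simp only [h, Bool.true_or]
        rw [if_pos trivial]
      · simp only [Bool.not_eq_true] at h
        rw [ih]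
        simp only [h, Bool.false_or]
        rw [if_neg Bool.false_ne_true]
        rfl

theorem sCond_cons (sig : String) (sigs : List String) (headers : List (String × String)) (htmlLower : String) :
    sCond (sig :: sigs) headers htmlLower =
      (aCond (PySem.Str.lower sig) headers htmlLower || sCond sigs headers htmlLower) := by
  simp only [sCond, aCond, bPieces, List.any_cons, List.any_flatMap, List.any_nil, Bool.or_false]
  cases PySem.Str.isIn (PySem.Str.lower sig) htmlLower <;> simp

theorem aSigLoop_eq (waf : String) (sigs : List String) (headers : List (String × String))
    (htmlLower : String) (detected : List String) (hnot : waf ∉ detected) :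
    aSigLoop waf sigs headers htmlLower detected =
      if sCond sigs headers htmlLower then detected ++ [waf] else detected := by
  induction sigs with
  | nil => simp [aSigLoop, sCond]
  | cons sig rest ih =>
      simp only [aSigLoop]
      rw [aHeaderLoop_eq, sCond_cons]
      by_cases h : aCond (PySem.Str.lower sig) headers htmlLower = true
      · simp only [h]
        simp
      · simp only [Bool.not_eq_true] at h
        simp only [h, Bool.false_or]
        rw [if_neg Bool.false_ne_true, if_neg (by simp [hnot]), ih]

-- A's outer fold over the WAF table equals a filterMap by sCond, given fresh, distinct pending names.
theorem foldl_eq_filterMap (headers : List (String × String)) (htmlLower : String) :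
    ∀ (ws : List (String × List String)) (detected : List String),
      (∀ w ∈ ws, w.1 ∉ detected) → (ws.map Prod.fst).Nodup →
      ws.foldl (fun d p => aSigLoop p.1 p.2 headers htmlLower d) detected =
        detected ++ ws.filterMap (fun p => if sCond p.2 headers htmlLower then some p.1 else none) := by
  intro ws
  induction ws with
  | nil => simp
  | cons p rest ih =>
      intro detected hfresh hnodup
      obtain ⟨w, sigs⟩ := p
      simp only [List.foldl_cons]
      rw [aSigLoop_eq w sigs headers htmlLower detected (hfresh _ (List.mem_cons_self))]
      simp only [List.map_cons, List.nodup_cons] at hnodup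
      by_cases hb : sCond sigs headers htmlLower = true
      · rw [if_pos hb]
        rw [ih (detected ++ [w]) ?_ hnodup.2]
        · simp [hb]
        · intro q hq
          simp only [List.mem_append, List.mem_singleton]
          rintro (h | h)
          · exact hfresh q (List.mem_cons_of_mem _ hq) h
          · exact hnodup.1 (h ▸ List.mem_map_of_mem (f := Prod.fst) hq)
      · rw [if_neg hb]
        rw [ih detected (fun q hq => hfresh q (List.mem_cons_of_mem _ hq)) hnodup.2]
        simp [hb]

-- B's inner fold (over the WAF table, for one piece): membership characterisation.
theorem mem_inner_fold (piece : String) (w : String) :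
    ∀ (L : List (String × List String)) (fd : PySem.Set String),
      w ∈ L.foldl (fun fd ws => if pHit piece ws.2 then PySem.Set.add fd ws.1 else fd) fd ↔
        w ∈ fd ∨ ∃ ws ∈ L, ws.1 = w ∧ pHit piece ws.2 = true := by
  intro L
  induction L with
  | nil => simp
  | cons q rest ih =>
      intro fd
      simp only [List.foldl_cons]
      by_cases h : pHit piece q.2 = true
      · rw [if_pos h, ih]
        simp only [PySem.Set.mem_add, List.mem_cons]
        constructor
        · rintro (⟨hm | he⟩ | ⟨ws, hws, hk, hc⟩)
          · exact Or.inl hm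
          · exact Or.inr ⟨q, Or.inl rfl, he.symm, h⟩
          · exact Or.inr ⟨ws, Or.inr hws, hk, hc⟩
        · rintro (hm | ⟨ws, hws | hws, hk, hc⟩)
          · exact Or.inl (Or.inl hm)
          · exact Or.inl (Or.inr (hws ▸ hk).symm)
          · exact Or.inr ⟨ws, hws, hk, hc⟩
      · rw [if_neg h, ih]
        simp only [List.mem_cons]
        constructor
        · rintro (hm | ⟨ws, hws, hk, hc⟩)
          · exact Or.inl hm
          · exact Or.inr ⟨ws, Or.inr hws, hk, hc⟩
        · rintro (hm | ⟨ws, hws | hws, hk, hc⟩)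
          · exact Or.inl hm
          · exact absurd (hws ▸ hc) h
          · exact Or.inr ⟨ws, hws, hk, hc⟩

-- B's outer fold (over the pieces): membership characterisation.
theorem mem_outer_fold (w : String) (L : List (String × List String)) :
    ∀ (ps : List String) (fd : PySem.Set String),
      w ∈ ps.foldl (fun fd piece =>
            L.foldl (fun fd ws => if pHit piece ws.2 then PySem.Set.add fd ws.1 else fd) fd) fd ↔
        w ∈ fd ∨ ∃ p ∈ ps, ∃ ws ∈ L, ws.1 = w ∧ pHit p ws.2 = true := by
  intro ps
  induction ps with
  | nil => simp
  | cons p rest ih =>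
      intro fd
      simp only [List.foldl_cons, ih, mem_inner_fold, List.mem_cons]
      constructor
      · rintro (⟨hm | ⟨ws, hws, hk, hc⟩⟩ | ⟨q, hq, hrest⟩)
        · exact Or.inl hm
        · exact Or.inr ⟨p, Or.inl rfl, ws, hws, hk, hc⟩
        · exact Or.inr ⟨q, Or.inr hq, hrest⟩
      · rintro (hm | ⟨q, hq | hq, hrest⟩)
        · exact Or.inl (Or.inl hm)
        · exact Or.inl (Or.inr (hq ▸ hrest))
        · exact Or.inr ⟨q, hq, hrest⟩

-- With distinct table keys, the found-set test at an entry of the table collapses to that entry's sCond.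
theorem contains_found_eq (headers : List (String × String)) (htmlLower : String)
    (ws : String × List String) (hmem : ws ∈ wafSignatures) :
    PySem.Set.contains
      ((bPieces headers htmlLower).foldl (fun fd piece =>
        wafSignatures.foldl (fun fd w => if pHit piece w.2 then PySem.Set.add fd w.1 else fd) fd)
        PySem.Set.empty) ws.1 = sCond ws.2 headers htmlLower := by
  have hnodup : (wafSignatures.map Prod.fst).Nodup := by decide
  rcases hc : sCond ws.2 headers htmlLower with _ | _
  · -- sCond false: no piece hits ws; any table entry with key ws.1 is ws itself
    rw [Bool.eq_false_iff]
    intro habs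
    rw [PySem.Set.contains_iff, mem_outer_fold] at habs
    rcases habs with hm | ⟨p, hp, ws', hws', hk, hhit⟩
    · simp [PySem.Set.empty] at hm
    · have hws : ws' = ws := List.inj_on_of_nodup_map hnodup hws' hmem hk
      rw [hws] at hhit
      have : sCond ws.2 headers htmlLower = true := by
        simp only [sCond, pHit, List.any_eq_true] at hhit ⊢
        obtain ⟨sig, hsig, hin⟩ := hhit
        exact ⟨sig, hsig, p, hp, hin⟩
      rw [hc] at this; exact Bool.false_ne_true this
  · rw [PySem.Set.contains_iff, mem_outer_fold]
    simp only [sCond, List.any_eq_true] at hc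
    obtain ⟨sig, hsig, p, hp, hin⟩ := hc
    exact Or.inr ⟨p, hp, ws, hmem, rfl, by simp only [pHit, List.any_eq_true]; exact ⟨sig, hsig, hin⟩⟩

-- map-then-filter = filterMap
theorem map_filter_eq_filterMap (L : List (String × List String)) (p : String → Bool) :
    (L.map Prod.fst).filter p = L.filterMap (fun ws => if p ws.1 then some ws.1 else none) := by
  induction L with
  | nil => rfl
  | cons q rest ih =>
      simp only [List.map_cons, List.filter_cons, List.filterMap_cons]
      cases h : p q.1 <;> simp [ih, h]

-- ===== VERDICT (by name: the statement is the Claim_ definition above) =====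
theorem detect_waf_py_spec : Claim_equal_detect_waf_py := by
  intro headers html _
  show detect_waf_py headers html = detect_waf_py_alt headers html
  simp only [detect_waf_py, detect_waf_py_alt]
  rw [foldl_eq_filterMap headers _ wafSignatures [] (by simp) (by decide), List.nil_append,
    map_filter_eq_filterMap]
  have key : ∀ ws ∈ wafSignatures,
      (if sCond ws.2 headers (PySem.Str.slice (PySem.Str.lower html) none (some 5000)) = true
        then some ws.1 else none) =
      (if PySem.Set.contains
          ((bPieces headers (PySem.Str.slice (PySem.Str.lower html) none (some 5000))).foldl
            (fun fd piece =>
              wafSignatures.foldl (fun fd w => if pHit piece w.2 then PySem.Set.add fd w.1 else fd) fd)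
            PySem.Set.empty) ws.1 = true
        then some ws.1 else none) := by
    intro ws hmem
    rw [contains_found_eq headers _ ws hmem]
  rw [List.filterMap_congr key]
  rfl
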